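-- pv_equiv track=rewrite | github.com/uninghetvatly/python-group-study-project | BaoHuynh/Intro_ex.py | sum_product_odd_even
-- ===== SOURCE A (Python) =====
-- def sum_product_odd_even(n):
--     sum_odd = 0
--     sum_even = 0
--     pro_odd = 1
--     pro_even = 1
--     for i in range(1, n + 1, 2):
--         sum_odd += i
--         if i + 1 <= n:
--             sum_even += (i + 1)
--         pro_odd *= i
--         if i + 1 <= n:
--             pro_even *= (i + 1)
--     return sum_odd, sum_even, pro_odd, pro_even
-- ===== SOURCE B (Python) =====
-- def sum_product_odd_even(n):
--     # closed-form sums; two independent product loops over separate ranges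
--     m = max(0, (n + 1) // 2)   # number of odd values 1,3,... <= n
--     k = max(0, n // 2)         # number of even values 2,4,... <= n
--     sum_odd = m * m
--     sum_even = k * (k + 1)
--     pro_odd = 1
--     for i in range(1, n + 1, 2):
--         pro_odd *= i
--     pro_even = 1
--     for j in range(2, n + 1, 2):
--         pro_even *= j
--     return sum_odd, sum_even, pro_odd, pro_even
-- ===== Notes on version B (the rewrite author's own statement) =====
-- stated objective: alternative
-- what changed: Replaces A's single interleaved stride-2 loop (four accumulators with in-loop conditionals) by closed-form sums (m*m and k*(k+1) from floor divisions) plus two separate unconditional product loops over the odd and even ranges.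
import Mathlib
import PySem

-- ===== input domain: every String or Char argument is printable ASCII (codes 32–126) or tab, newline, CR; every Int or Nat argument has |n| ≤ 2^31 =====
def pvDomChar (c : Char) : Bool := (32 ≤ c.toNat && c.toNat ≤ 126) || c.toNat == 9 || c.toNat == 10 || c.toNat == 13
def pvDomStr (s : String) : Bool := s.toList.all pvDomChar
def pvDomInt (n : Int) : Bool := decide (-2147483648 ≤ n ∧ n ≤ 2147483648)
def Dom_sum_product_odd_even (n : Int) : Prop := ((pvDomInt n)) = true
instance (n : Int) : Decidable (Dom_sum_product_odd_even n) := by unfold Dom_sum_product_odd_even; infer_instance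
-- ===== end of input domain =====

-- B replaces A's single interleaved stride-2 loop by closed-form sums plus two
-- separate product loops over the odd and even ranges (alternative decomposition).

-- ===== PORT A =====
-- loop body of A's for-loop (the four accumulators, branches in source order)
def stepA (n : Int) (s : Int × Int × Int × Int) (i : Int) : Int × Int × Int × Int :=
  let sum_odd := s.1 + i
  let sum_even := if i + 1 ≤ n then s.2.1 + (i + 1) else s.2.1
  let pro_odd := s.2.2.1 * i
  let pro_even := if i + 1 ≤ n then s.2.2.2 * (i + 1) else s.2.2.2
  (sum_odd, sum_even, pro_odd, pro_even)

def sum_product_odd_even (n : Int) : Int × Int × Int × Int :=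
  (PySem.List.pyRange 1 (n + 1) 2).foldl (stepA n) (0, 0, 1, 1)

-- ===== PORT B =====
def sum_product_odd_even_alt (n : Int) : Int × Int × Int × Int :=
  let m := max 0 (PySem.Int.floordiv (n + 1) 2)
  let k := max 0 (PySem.Int.floordiv n 2)
  let sum_odd := m * m
  let sum_even := k * (k + 1)
  let pro_odd := (PySem.List.pyRange 1 (n + 1) 2).foldl (fun acc i => acc * i) 1
  let pro_even := (PySem.List.pyRange 2 (n + 1) 2).foldl (fun acc j => acc * j) 1
  (sum_odd, sum_even, pro_odd, pro_even)

-- ===== PRECONDITION & SPEC =====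
def Spec_sum_product_odd_even (n : Int) (out : Int × Int × Int × Int) : Prop := out = sum_product_odd_even_alt n
instance (n : Int) (out : Int × Int × Int × Int) : Decidable (Spec_sum_product_odd_even n out) := by unfold Spec_sum_product_odd_even; infer_instance

-- ===== CLAIM (what is proved, stated in full; the proofs are below) =====
def Claim_equal_sum_product_odd_even : Prop := ∀ (n : Int), Dom_sum_product_odd_even n → Spec_sum_product_odd_even n (sum_product_odd_even n)

-- ===== LEMMAS AND PROOFS =====

-- the list of the first m odd / even positive integers
def oddList (m : Nat) : List Int := (List.range m).map (fun k : Nat => (1 : Int) + 2 * (k : Int))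
def evenList (m : Nat) : List Int := (List.range m).map (fun k : Nat => (2 : Int) + 2 * (k : Int))

lemma oddList_succ (m : Nat) : oddList (m + 1) = oddList m ++ [(1 : Int) + 2 * m] := by
  simp [oddList, List.range_succ]

lemma evenList_succ (m : Nat) : evenList (m + 1) = evenList m ++ [(2 : Int) + 2 * m] := by
  simp [evenList, List.range_succ]

-- invariant of A's loop after consuming the first m odd numbers
lemma loop_char (n : Int) : ∀ (m : Nat), (m = 0 ∨ 2 * (m : Int) ≤ n + 1) →
    (oddList m).foldl (stepA n) (0, 0, 1, 1) =
      ((m : Int) * m,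
       (if 2 * (m : Int) ≤ n then (m : Int) * (m + 1) else (m : Int) * ((m : Int) - 1)),
       (oddList m).foldl (fun acc i => acc * i) 1,
       (evenList (if 2 * (m : Int) ≤ n then m else m - 1)).foldl (fun acc j => acc * j) 1) := by
  intro m
  induction m with
  | zero =>
    intro _
    simp only [oddList, evenList, List.range_zero, List.map_nil, List.foldl_nil,
      Nat.cast_zero, Nat.zero_sub]
    split_ifs <;> simp
  | succ m ih =>
    intro h
    have hb : 2 * ((m : Int) + 1) ≤ n + 1 := by
      rcases h with h | h
      · omega
      · push_cast at h; omega
    have hm : 2 * (m : Int) ≤ n := by omega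
    rw [oddList_succ, List.foldl_append, ih (Or.inr (by omega))]
    simp only [if_pos hm, List.foldl_cons, List.foldl_nil, stepA]
    have key : ((1 : Int) + 2 * (m : Int) + 1 ≤ n) ↔ (2 * (((m + 1 : Nat)) : Int) ≤ n) := by
      push_cast; omega
    by_cases hc : (1 : Int) + 2 * (m : Int) + 1 ≤ n
    · simp only [if_pos hc, if_pos (key.mp hc), evenList_succ, List.foldl_append,
        List.foldl_cons, List.foldl_nil, Prod.mk.injEq]
      repeat' apply And.intro
      all_goals first | trivial | rfl | (push_cast; ring)
    · simp only [if_neg hc, if_neg (fun hx => hc (key.mpr hx)), Nat.add_sub_cancel,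
        List.foldl_append, List.foldl_cons, List.foldl_nil, Prod.mk.injEq]
      repeat' apply And.intro
      all_goals first | trivial | rfl | (push_cast; ring)

lemma pyRange_odd (n : Int) (hn : 0 < n) :
    PySem.List.pyRange 1 (n + 1) 2 = oddList ((n + 1) / 2).toNat := by
  rw [PySem.List.pyRange_of_pos 1 (n + 1) (by norm_num)]
  rw [if_pos (by omega)]
  have : (n + 1 - 1 + 2 - 1) / 2 = (n + 1) / 2 := by omega
  rw [this]; rfl

lemma pyRange_even (n : Int) (hn : 0 < n) :
    PySem.List.pyRange 2 (n + 1) 2 = evenList (n / 2).toNat := by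
  rw [PySem.List.pyRange_of_pos 2 (n + 1) (by norm_num)]
  by_cases h2 : 2 < n + 1
  · rw [if_pos h2]
    have : (n + 1 - 2 + 2 - 1) / 2 = n / 2 := by omega
    rw [this]; rfl
  · rw [if_neg h2]
    have : (n / 2).toNat = 0 := by omega
    rw [this]; rfl

lemma pyRange_empty (a n : Int) (h : n ≤ 0) (ha : 1 ≤ a) :
    PySem.List.pyRange a (n + 1) 2 = [] := by
  rw [PySem.List.pyRange_of_pos a (n + 1) (by norm_num), if_neg (by omega)]
  rfl

-- ===== VERDICT (by name: the statement is the Claim_ definition above) =====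
theorem sum_product_odd_even_spec : Claim_equal_sum_product_odd_even := by
  intro n _
  unfold Spec_sum_product_odd_even sum_product_odd_even sum_product_odd_even_alt
  rw [PySem.Int.floordiv_eq_ediv_of_pos (by norm_num), PySem.Int.floordiv_eq_ediv_of_pos (by norm_num)]
  by_cases hn : 0 < n
  · rw [pyRange_odd n hn, pyRange_even n hn]
    set m : Nat := ((n + 1) / 2).toNat with hm
    rw [loop_char n m (Or.inr (by omega))]
    have h1 : max 0 ((n + 1) / 2) = (m : Int) := by omega
    have h2 : max 0 (n / 2) = n / 2 := by omega
    rw [h1, h2]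
    simp only [Prod.mk.injEq]
    refine ⟨?_, ?_, ?_, ?_⟩ <;> first | trivial | skip
    · by_cases hc : 2 * (m : Int) ≤ n
      · rw [if_pos hc]
        have : (m : Int) = n / 2 := by omega
        rw [this]
      · rw [if_neg hc]
        have : (m : Int) - 1 = n / 2 := by omega
        have hm1 : (m : Int) = n / 2 + 1 := by omega
        rw [hm1]; ring
    · by_cases hc : 2 * (m : Int) ≤ n
      · rw [if_pos hc]
        have : m = (n / 2).toNat := by omega
        rw [this]
      · rw [if_neg hc]
        have : m - 1 = (n / 2).toNat := by omega
        rw [this]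
  · rw [pyRange_empty 1 n (by omega) (by norm_num), pyRange_empty 2 n (by omega) (by norm_num)]
    have h1 : max 0 ((n + 1) / 2) = 0 := by omega
    have h2 : max 0 (n / 2) = 0 := by omega
    rw [h1, h2]
    simp
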